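-- pv_equiv track=rewrite | github.com/batesasho/python_advanced | multi_dimensional_lists/exercise_2/knight_game_v1.py | check_horse_possible_positions
-- ===== SOURCE A (Python) =====
-- from collections import namedtuple
--
-- def check_horse_possible_positions(matrix: list) -> int:
--
--     max_count = 0
--     Rows_positions, Column_positions = namedtuple("Rows_positions", "x"), namedtuple("Column_positions", "y")
--     rows_positions, column_positions = Rows_positions([2, 2, -2, -2, -1, -1, 1, 1]), \
--                                        Column_positions([1, -1, 1, -1, -2, 2, 2, -2])
--     removed_counter = 0
--     row_column_indecies = []
--     while True:
--         for row in range(len(matrix)):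
--             for column in range(len(matrix[0])):
--                 count = 0
--                 if matrix[row][column] == "K":
--                     for index_horse_options in range(len(rows_positions.x)):
--                         row_option = rows_positions.x[index_horse_options]
--                         column_option = column_positions.y[index_horse_options]
--                         if row + row_option in range(len(matrix)) and column + column_option in range(len(matrix[0])):
--                             if matrix[row + row_option][column + column_option] == "K":
--                                 count += 1
--                 if max_count < count:
--                     max_count = count
--                     row_column_indecies = [row, column]
--
--         if row_column_indecies:
--             matrix[row_column_indecies[0]][row_column_indecies[1]] = "0"
--             row_column_indecies =[]
--
--             removed_counter += 1
--
--         else: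
--             break
--     return removed_counter
-- ===== SOURCE B (Python) =====
-- def check_horse_possible_positions(matrix: list) -> int:
--     # A's max_count is never reset across passes, and a removal can only lower
--     # attack counts, so A removes at most one knight: the answer is 1 exactly
--     # when some knight attacks another, else 0.  One pass, no mutation.
--     rows = len(matrix)
--     cols = len(matrix[0]) if matrix else 0
--     offsets = [(2, 1), (2, -1), (-2, 1), (-2, -1), (-1, -2), (-1, 2), (1, 2), (1, -2)]
--     for r in range(rows):
--         for c in range(cols):
--             if matrix[r][c] == "K":
--                 for dr, dc in offsets:
--                     rr, cc = r + dr, c + dc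
--                     if 0 <= rr < rows and 0 <= cc < cols and matrix[rr][cc] == "K":
--                         return 1
--     return 0
-- ===== Notes on version B (the rewrite author's own statement) =====
-- stated objective: simpler
-- what changed: A repeatedly rescans and mutates the whole board, but because its max_count is never reset between passes and a removal can only lower attack counts, A removes at most one knight; B returns that 0/1 answer (does any knight attack another?) in a single early-exit pass without mutating the matrix.
import Mathlib
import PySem

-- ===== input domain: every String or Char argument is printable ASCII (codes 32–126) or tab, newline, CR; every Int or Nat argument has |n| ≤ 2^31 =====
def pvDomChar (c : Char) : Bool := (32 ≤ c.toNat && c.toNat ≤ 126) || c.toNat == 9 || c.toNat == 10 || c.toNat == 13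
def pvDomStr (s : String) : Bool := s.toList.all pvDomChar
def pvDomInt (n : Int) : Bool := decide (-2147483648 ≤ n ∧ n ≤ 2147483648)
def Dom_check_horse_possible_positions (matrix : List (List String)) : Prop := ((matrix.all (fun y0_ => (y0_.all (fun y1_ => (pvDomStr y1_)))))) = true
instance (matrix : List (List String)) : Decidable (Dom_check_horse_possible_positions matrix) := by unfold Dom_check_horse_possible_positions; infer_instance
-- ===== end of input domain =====

-- B replaces A's repeated full-board rescan loop (whose never-reset max_count makes it
-- remove at most one knight) by a single early-exit pass answering "does any knight
-- attack another?"; A mutates its argument in place, B does not — the equivalence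
-- proved here is about the return value only.

-- ===== PORT A =====
-- matrix[r][c] (both ports): all accesses are index-guarded in the sources; the getD
-- defaults are only reachable on ragged inputs excluded by Pre_.
def pvCell (m : List (List String)) (r c : Nat) : String := (m.getD r []).getD c ""

def pvRowsX : List Int := [2, 2, -2, -2, -1, -1, 1, 1]
def pvColsY : List Int := [1, -1, 1, -1, -2, 2, 2, -2]

-- A's inner 'for index_horse_options in range(8)' loop over the two parallel tuples
def pvCountA (m : List (List String)) (row col : Nat) : Int :=
  (List.zip pvRowsX pvColsY).foldl (fun count rc =>
    if 0 ≤ (row : Int) + rc.1 ∧ (row : Int) + rc.1 < (m.length : Int) ∧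
       0 ≤ (col : Int) + rc.2 ∧ (col : Int) + rc.2 < ((m.headD []).length : Int) then
      (if pvCell m ((row : Int) + rc.1).toNat ((col : Int) + rc.2).toNat = "K" then count + 1 else count)
    else count) 0

-- the 'count' of one cell of the scan (0 when the cell is not "K")
def pvCnt (m : List (List String)) (p : Nat × Nat) : Int :=
  if pvCell m p.1 p.2 = "K" then pvCountA m p.1 p.2 else 0

-- one step of the row-major scan: state = (max_count, row_column_indecies)
def pvStep (m : List (List String)) (st : Int × Option (Nat × Nat)) (p : Nat × Nat) :
    Int × Option (Nat × Nat) :=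
  if st.1 < pvCnt m p then (pvCnt m p, some p) else st

def pvPairs (m : List (List String)) : List (Nat × Nat) :=
  (List.range m.length).flatMap (fun r => (List.range (m.headD []).length).map (fun c => (r, c)))

-- the nested 'for row … for column …' scan of one pass of A's while-loop
def pvScan (m : List (List String)) (mc : Int) : Int × Option (Nat × Nat) :=
  (pvPairs m).foldl (pvStep m) (mc, none)

-- matrix[r][c] = "0"
def pvRemove (m : List (List String)) (p : Nat × Nat) : List (List String) :=
  m.set p.1 ((m.getD p.1 []).set p.2 "0")

def pvCountK (m : List (List String)) : Nat :=
  (m.map (fun row => row.countP (fun s => s == "K"))).sum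

-- A's 'while True' loop; fuel is a termination guard only (each continuing pass
-- overwrites a "K", so fuel = #K + 1 is never exhausted)
def pvLoop (m : List (List String)) (fuel : Nat) (mc removed : Int) : Int :=
  match fuel with
  | 0 => removed
  | f + 1 =>
    match pvScan m mc with
    | (mc', some p) => pvLoop (pvRemove m p) f mc' (removed + 1)
    | (_, none) => removed

def check_horse_possible_positions (matrix : List (List String)) : Int :=
  pvLoop matrix (pvCountK matrix + 1) 0 0

-- ===== PORT B =====
def pvOffsets : List (Int × Int) := [(2,1),(2,-1),(-2,1),(-2,-1),(-1,-2),(-1,2),(1,2),(1,-2)]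

-- Source B's inner offsets loop with its early 'return 1'
def pvAttackedB (m : List (List String)) (rows cols : Nat) (r c : Nat) : Bool :=
  pvOffsets.any (fun o =>
    decide (0 ≤ (r : Int) + o.1) && decide ((r : Int) + o.1 < (rows : Int)) &&
    decide (0 ≤ (c : Int) + o.2) && decide ((c : Int) + o.2 < (cols : Int)) &&
    (pvCell m ((r : Int) + o.1).toNat ((c : Int) + o.2).toNat == "K"))

def check_horse_possible_positions_alt (matrix : List (List String)) : Int :=
  let rows := matrix.length
  let cols := (matrix.headD []).length
  if (List.range rows).any (fun r => (List.range cols).any (fun c =>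
       (pvCell matrix r c == "K") && pvAttackedB matrix rows cols r c))
  then 1 else 0

-- ===== PRECONDITION & SPEC =====
-- Pre_ excludes ragged matrices with a row shorter than row 0, on which Python A
-- raises IndexError while scanning.
def Pre_check_horse_possible_positions (matrix : List (List String)) : Prop :=
  ∀ row ∈ matrix, (matrix.headD []).length ≤ row.length
instance (matrix : List (List String)) : Decidable (Pre_check_horse_possible_positions matrix) := by
  unfold Pre_check_horse_possible_positions; infer_instance

def pvWitness_check_horse_possible_positions : List (List String) := [["K", "0"], ["0", "K"]]

def Spec_check_horse_possible_positions (matrix : List (List String)) (out : Int) : Prop := out = check_horse_possible_positions_alt matrix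
instance (matrix : List (List String)) (out : Int) : Decidable (Spec_check_horse_possible_positions matrix out) := by unfold Spec_check_horse_possible_positions; infer_instance

-- ===== CLAIM (what is proved, stated in full; the proofs are below) =====
def Claim_equal_check_horse_possible_positions : Prop := ∀ (matrix : List (List String)), Dom_check_horse_possible_positions matrix → Pre_check_horse_possible_positions matrix → Spec_check_horse_possible_positions matrix (check_horse_possible_positions matrix)

-- ===== LEMMAS AND PROOFS =====

-- the indicator tested for each of the 8 knight offsets
def pvIndB (m : List (List String)) (row col : Nat) (o : Int × Int) : Bool :=
  decide ((0 ≤ (row : Int) + o.1 ∧ (row : Int) + o.1 < (m.length : Int) ∧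
           0 ≤ (col : Int) + o.2 ∧ (col : Int) + o.2 < ((m.headD []).length : Int)) ∧
          pvCell m ((row : Int) + o.1).toNat ((col : Int) + o.2).toNat = "K")

lemma pvCountA_eq (m : List (List String)) (row col : Nat) :
    pvCountA m row col = (pvOffsets.countP (pvIndB m row col) : Int) := by
  have hz : List.zip pvRowsX pvColsY = pvOffsets := by decide
  unfold pvCountA
  rw [hz]
  refine Eq.trans (PySem.List.foldl_congr_mem pvOffsets _ _ 0 ?_)
    (Eq.trans (PySem.List.foldl_if_add_one (pvIndB m row col) pvOffsets 0) (by simp))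
  intro acc o _
  unfold pvIndB
  by_cases h1 : (0 ≤ (row : Int) + o.1 ∧ (row : Int) + o.1 < (m.length : Int) ∧
      0 ≤ (col : Int) + o.2 ∧ (col : Int) + o.2 < ((m.headD []).length : Int)) <;>
    by_cases h2 : pvCell m ((row : Int) + o.1).toNat ((col : Int) + o.2).toNat = "K" <;>
    simp [h1, h2]

lemma pvCnt_pos_iff (m : List (List String)) (p : Nat × Nat) :
    0 < pvCnt m p ↔
      ((pvCell m p.1 p.2 == "K") && pvAttackedB m m.length (m.headD []).length p.1 p.2) = true := by
  unfold pvCnt pvAttackedB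
  split_ifs with h
  · rw [pvCountA_eq]
    simp only [h, beq_self_eq_true, Bool.true_and]
    rw [Int.natCast_pos, List.countP_pos_iff, List.any_eq_true]
    constructor
    · rintro ⟨o, ho, hind⟩
      refine ⟨o, ho, ?_⟩
      unfold pvIndB at hind
      simp only [decide_eq_true_eq] at hind
      simp only [Bool.and_eq_true, decide_eq_true_eq, beq_iff_eq]
      tauto
    · rintro ⟨o, ho, hb⟩
      refine ⟨o, ho, ?_⟩
      simp only [Bool.and_eq_true, decide_eq_true_eq, beq_iff_eq] at hb
      unfold pvIndB
      simp only [decide_eq_true_eq]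
      tauto
  · simp [h]

lemma mem_pvPairs (m : List (List String)) (p : Nat × Nat) :
    p ∈ pvPairs m ↔ p.1 < m.length ∧ p.2 < (m.headD []).length := by
  unfold pvPairs
  rcases p with ⟨r, c⟩
  simp [List.mem_flatMap, List.mem_map, List.mem_range]

lemma scan_mono (m : List (List String)) (l : List (Nat × Nat)) (st : Int × Option (Nat × Nat)) :
    st.1 ≤ (l.foldl (pvStep m) st).1 := by
  induction l generalizing st with
  | nil => simp
  | cons p l ih =>
    simp only [List.foldl_cons]
    refine le_trans ?_ (ih (pvStep m st p))
    by_cases h : st.1 < pvCnt m p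
    · simp only [pvStep, if_pos h]
      exact le_of_lt h
    · simp only [pvStep, if_neg h]
      exact le_refl _

lemma scan_bound (m : List (List String)) (l : List (Nat × Nat)) (st : Int × Option (Nat × Nat))
    (p : Nat × Nat) (hp : p ∈ l) : pvCnt m p ≤ (l.foldl (pvStep m) st).1 := by
  induction l generalizing st with
  | nil => simp at hp
  | cons q l ih =>
    simp only [List.foldl_cons]
    rcases List.mem_cons.mp hp with h | h
    · subst h
      refine le_trans ?_ (scan_mono m l (pvStep m st p))
      by_cases h : st.1 < pvCnt m p
      · simp only [pvStep, if_pos h]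
        exact le_refl _
      · simp only [pvStep, if_neg h]
        omega
    · exact ih _ h

lemma scan_stable (m : List (List String)) (l : List (Nat × Nat)) (st : Int × Option (Nat × Nat))
    (h : ∀ p ∈ l, pvCnt m p ≤ st.1) : l.foldl (pvStep m) st = st := by
  induction l with
  | nil => rfl
  | cons q l ih =>
    simp only [List.foldl_cons]
    have hq : pvCnt m q ≤ st.1 := h q (List.mem_cons_self)
    have hstep : pvStep m st q = st := by
      unfold pvStep
      rw [if_neg (by omega)]
    rw [hstep]
    exact ih (fun p hp => h p (List.mem_cons_of_mem _ hp))

lemma scan_none_inv (m : List (List String)) (l : List (Nat × Nat)) (st : Int × Option (Nat × Nat))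
    (h : (l.foldl (pvStep m) st).2 = none) : st.2 = none ∧ ∀ p ∈ l, pvCnt m p ≤ st.1 := by
  induction l generalizing st with
  | nil => exact ⟨h, by simp⟩
  | cons q l ih =>
    simp only [List.foldl_cons] at h
    by_cases hlt : st.1 < pvCnt m q
    · have hstep : pvStep m st q = (pvCnt m q, some q) := by unfold pvStep; simp [hlt]
      rw [hstep] at h
      have := (ih _ h).1
      simp at this
    · have hstep : pvStep m st q = st := by unfold pvStep; simp [hlt]
      rw [hstep] at h
      obtain ⟨h1, h2⟩ := ih _ h
      refine ⟨h1, ?_⟩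
      intro p hp
      rcases List.mem_cons.mp hp with h | h
      · subst h; omega
      · exact h2 p h

lemma scan_some_inv (m : List (List String)) (l : List (Nat × Nat)) (st : Int × Option (Nat × Nat))
    (q : Nat × Nat) (h0 : 0 ≤ st.1) (h : (l.foldl (pvStep m) st).2 = some q) :
    st.2 = some q ∨ (q ∈ l ∧ 0 < pvCnt m q) := by
  induction l generalizing st with
  | nil => exact Or.inl h
  | cons p l ih =>
    simp only [List.foldl_cons] at h
    by_cases hlt : st.1 < pvCnt m p
    · have hstep : pvStep m st p = (pvCnt m p, some p) := by unfold pvStep; simp [hlt]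
      rw [hstep] at h
      rcases ih _ (by simp only; omega) h with h1 | h1
      · simp only [Option.some.injEq] at h1
        right
        refine ⟨?_, ?_⟩
        · rw [← h1]; exact List.mem_cons_self
        · rw [← h1]; omega
      · exact Or.inr ⟨List.mem_cons_of_mem _ h1.1, h1.2⟩
    · have hstep : pvStep m st p = st := by unfold pvStep; simp [hlt]
      rw [hstep] at h
      rcases ih _ h0 h with h1 | h1
      · exact Or.inl h1
      · exact Or.inr ⟨List.mem_cons_of_mem _ h1.1, h1.2⟩

lemma pvGetD_set {α : Type} (l : List α) (i j : Nat) (a d : α) :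
    (l.set i a).getD j d = if i = j ∧ i < l.length then a else l.getD j d := by
  rw [List.getD_eq_getElem?_getD, List.getElem?_set]
  by_cases h1 : i = j
  · subst h1
    by_cases h2 : i < l.length
    · simp [h2]
    · simp [h2, List.getD_eq_getElem?_getD]
  · simp [h1, List.getD_eq_getElem?_getD]

-- cells of the board after a removal: never "K" where the original was not
lemma pvCell_remove (m : List (List String)) (q : Nat × Nat) (r c : Nat)
    (h : pvCell (pvRemove m q) r c = "K") : pvCell m r c = "K" := by
  unfold pvRemove at h
  unfold pvCell at h ⊢
  rw [pvGetD_set] at h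
  split_ifs at h with h1
  · rw [pvGetD_set] at h
    split_ifs at h with h2
    · exact absurd h (by decide)
    · rw [← h1.1]; exact h
  · exact h

lemma pvRemove_length (m : List (List String)) (q : Nat × Nat) :
    (pvRemove m q).length = m.length := by
  unfold pvRemove; simp

lemma pvRemove_head_length (m : List (List String)) (q : Nat × Nat) :
    ((pvRemove m q).headD []).length = (m.headD []).length := by
  unfold pvRemove
  obtain ⟨q1, q2⟩ := q
  cases m with
  | nil => rfl
  | cons hrow t =>
    cases q1 with
    | zero => simp
    | succ n => simp

lemma pvCnt_remove_le (m : List (List String)) (q p : Nat × Nat) :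
    pvCnt (pvRemove m q) p ≤ pvCnt m p := by
  unfold pvCnt
  by_cases h : pvCell (pvRemove m q) p.1 p.2 = "K"
  · rw [if_pos h, if_pos (pvCell_remove m q p.1 p.2 h)]
    rw [pvCountA_eq, pvCountA_eq]
    have hm : (pvOffsets.countP (pvIndB (pvRemove m q) p.1 p.2)) ≤
           (pvOffsets.countP (pvIndB m p.1 p.2)) := by
      apply List.countP_mono_left
      intro o _ ho
      unfold pvIndB at ho ⊢
      simp only [decide_eq_true_eq] at ho ⊢
      rw [pvRemove_length, pvRemove_head_length] at ho
      exact ⟨ho.1, pvCell_remove m q _ _ ho.2⟩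
    exact_mod_cast hm
  · rw [if_neg h]
    split_ifs with h2
    · rw [pvCountA_eq]; positivity
    · exact le_refl _

lemma pvPairs_remove (m : List (List String)) (q : Nat × Nat) :
    pvPairs (pvRemove m q) = pvPairs m := by
  unfold pvPairs
  rw [pvRemove_length, pvRemove_head_length]

lemma pvCountK_pos (m : List (List String)) (q : Nat × Nat)
    (hr : q.1 < m.length) (hK : pvCell m q.1 q.2 = "K") : 0 < pvCountK m := by
  unfold pvCountK
  unfold pvCell at hK
  have hrowmem : m.getD q.1 [] ∈ m := by
    rw [List.getD_eq_getElem?_getD, List.getElem?_eq_getElem hr]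
    exact List.getElem_mem hr
  have hKmem : "K" ∈ m.getD q.1 [] := by
    rcases Nat.lt_or_ge q.2 (m.getD q.1 []).length with hc | hc
    · rw [List.getD_eq_getElem?_getD (l := m.getD q.1 []), List.getElem?_eq_getElem hc] at hK
      simp only [Option.getD_some] at hK
      rw [← hK]
      exact List.getElem_mem hc
    · rw [List.getD_eq_getElem?_getD (l := m.getD q.1 []), List.getElem?_eq_none (by omega)] at hK
      exact absurd hK (by decide)
  have hpos : 0 < (m.getD q.1 []).countP (fun s => s == "K") :=
    List.countP_pos_iff.mpr ⟨"K", hKmem, by simp⟩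
  exact lt_of_lt_of_le hpos (List.le_sum_of_mem (List.mem_map_of_mem hrowmem))

-- B's any-condition holds iff some scanned cell has positive count
lemma alt_any_iff (m : List (List String)) :
    ((List.range m.length).any (fun r => (List.range (m.headD []).length).any (fun c =>
       (pvCell m r c == "K") && pvAttackedB m m.length (m.headD []).length r c))) = true ↔
    ∃ p ∈ pvPairs m, 0 < pvCnt m p := by
  simp only [List.any_eq_true, List.mem_range]
  constructor
  · rintro ⟨r, hr, c, hc, hb⟩
    exact ⟨(r, c), (mem_pvPairs m (r, c)).mpr ⟨hr, hc⟩, (pvCnt_pos_iff m (r, c)).mpr hb⟩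
  · rintro ⟨p, hp, hpos⟩
    obtain ⟨hr, hc⟩ := (mem_pvPairs m p).mp hp
    exact ⟨p.1, hr, p.2, hc, (pvCnt_pos_iff m p).mp hpos⟩

-- ===== VERDICT (by name: the statement is the Claim_ definition above) =====
theorem check_horse_possible_positions_spec : Claim_equal_check_horse_possible_positions := by
  intro matrix _ _
  unfold Spec_check_horse_possible_positions
  unfold check_horse_possible_positions
  simp only [check_horse_possible_positions_alt]
  rcases hsc : pvScan matrix 0 with ⟨mc1, st2⟩
  cases st2 with
  | none =>
    -- no cell raises max_count 0: A returns 0 and B finds no attacking knight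
    have hle := (scan_none_inv matrix (pvPairs matrix) (0, none) (by rw [show (pvPairs matrix).foldl (pvStep matrix) (0, none) = pvScan matrix 0 from rfl, hsc])).2
    have hany : ¬ ∃ p ∈ pvPairs matrix, 0 < pvCnt matrix p := by
      rintro ⟨p, hp, hpos⟩
      have := hle p hp
      simp only at this
      omega
    rw [if_neg (fun h => hany ((alt_any_iff matrix).mp h))]
    simp only [pvLoop, hsc]
  | some q =>
    -- a knight is removed; the sticky max_count stops the second pass
    obtain hq | hq := scan_some_inv matrix (pvPairs matrix) (0, none) q (le_refl 0)
      (by rw [show (pvPairs matrix).foldl (pvStep matrix) (0, none) = pvScan matrix 0 from rfl, hsc])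
    · simp at hq
    obtain ⟨hqmem, hqpos⟩ := hq
    have hK : pvCell matrix q.1 q.2 = "K" := by
      by_contra h
      unfold pvCnt at hqpos
      rw [if_neg h] at hqpos
      omega
    have hfuel : 0 < pvCountK matrix :=
      pvCountK_pos matrix q ((mem_pvPairs matrix q).mp hqmem).1 hK
    -- B returns 1
    rw [if_pos ((alt_any_iff matrix).mpr ⟨q, hqmem, hqpos⟩)]
    -- A: first pass removes q …
    obtain ⟨f, hf⟩ : ∃ f, pvCountK matrix = f + 1 := ⟨pvCountK matrix - 1, by omega⟩
    rw [hf]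
    -- … and the second pass finds no count above the first pass's max
    have hmc1 : ∀ p ∈ pvPairs matrix, pvCnt matrix p ≤ mc1 := by
      intro p hp
      have := scan_bound matrix (pvPairs matrix) (0, none) p hp
      rw [show (pvPairs matrix).foldl (pvStep matrix) (0, none) = pvScan matrix 0 from rfl, hsc] at this
      exact this
    have hstable : pvScan (pvRemove matrix q) mc1 = (mc1, none) := by
      unfold pvScan
      rw [pvPairs_remove]
      exact scan_stable _ _ _ (fun p hp =>
        le_trans (pvCnt_remove_le matrix q p) (hmc1 p hp))
    simp only [pvLoop, hsc, hstable]
    norm_num
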